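-- pv_equiv track=rewrite | github.com/EvoEvolver/EvoNote | evonote/core/utils.py | escape_multi_quote
-- ===== SOURCE A (Python) =====
-- def escape_multi_quote(s: str):
--     # find the index where 3 or more double quotes appear
--     res = []
--     search_start = 0
--     while True:
--         pos = s.find('"""', search_start)
--         if pos == -1:
--             res.append(s[search_start:])
--             break
--         else:
--             res.append(s[search_start: pos])
--             quote_start = pos
--             # pos += 3
--             while pos < len(s):
--                 if s[pos] == '"':
--                     pos += 1
--                 else:
--                     break
--             res.append('\\"' * (pos - quote_start))
--             search_start = pos
--     return ''.join(res)
-- ===== SOURCE B (Python) =====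
-- def escape_multi_quote(s: str):
--     # one pass over maximal runs of identical characters:
--     # a run of >= 3 double quotes is emitted escaped, everything else verbatim
--     pieces = []
--     i = 0
--     n = len(s)
--     while i < n:
--         c = s[i]
--         j = i + 1
--         while j < n and s[j] == c:
--             j += 1
--         run = j - i
--         if c == '"' and run >= 3:
--             pieces.append('\\"' * run)
--         else:
--             pieces.append(c * run)
--         i = j
--     return ''.join(pieces)
-- ===== Notes on version B (the rewrite author's own statement) =====
-- stated objective: alternative
-- what changed: Replaces A's repeated substring-find scans for a triple quote plus an inner quote-rescan loop by a single left-to-right pass over maximal runs of identical characters, escaping each run of three or more double quotes and emitting every other run verbatim.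
import Mathlib
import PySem

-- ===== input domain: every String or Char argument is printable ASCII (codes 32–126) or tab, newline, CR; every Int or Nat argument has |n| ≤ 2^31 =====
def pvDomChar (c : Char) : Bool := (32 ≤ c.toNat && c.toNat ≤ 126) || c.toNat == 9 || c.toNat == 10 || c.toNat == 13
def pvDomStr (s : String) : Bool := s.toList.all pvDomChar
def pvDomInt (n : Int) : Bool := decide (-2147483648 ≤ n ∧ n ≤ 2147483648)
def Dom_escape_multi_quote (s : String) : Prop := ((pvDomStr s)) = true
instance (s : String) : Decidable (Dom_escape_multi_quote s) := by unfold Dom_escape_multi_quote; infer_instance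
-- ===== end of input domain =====

-- B replaces A's find-and-rescan loop by a single pass over maximal runs of identical
-- characters (objective: alternative run-grouping algorithm; same output everywhere).

-- length of the maximal leading run of `c` in `xs` (helper of port B; also used to state facts about A's inner loop)
def countRun (c : Char) : List Char → Nat
  | [] => 0
  | x :: xs => if x = c then countRun c xs + 1 else 0

-- ===== PORT A =====
-- the pattern '"""' searched for by A
def qqq : List Char := ['"', '"', '"']

-- A's inner while loop: `while pos < len(s): if s[pos] == '"': pos += 1 else: break`
def aInner (s : List Char) (pos : Nat) : Nat :=
  if h : pos < s.length then
    if s[pos] = '"' then aInner s (pos + 1) else pos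
  else pos
termination_by s.length - pos

-- needed by aOuter's termination proof, so it stays above the port
lemma aInner_eq (s : List Char) (p : Nat) : aInner s p = p + countRun '"' (s.drop p) := by
  rw [aInner]
  split
  · next h =>
    split
    · next hq =>
      have ih := aInner_eq s (p + 1)
      rw [ih, List.drop_eq_getElem_cons h]
      simp [countRun, hq]
      omega
    · next hq =>
      rw [List.drop_eq_getElem_cons h]
      simp [countRun, hq]
  · next h =>
    rw [List.drop_eq_nil_of_le (by omega)]
    simp [countRun]
termination_by s.length - p

-- needed by aOuter's termination proof, so it stays above the port
lemma prefix_countRun_ge (t : List Char) (h : qqq <+: t) : 3 ≤ countRun '"' t := by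
  obtain ⟨t', rfl⟩ := h
  simp [qqq, countRun]

-- A's outer while loop, accumulating the pieces of `res`; parameter is `search_start`.
-- The first guard is only a totality guard: for `search_start > len(s)` Python's find
-- returns -1 (start past the end), so the -1 branch's result is reproduced verbatim there.
def aOuter (s : List Char) (searchStart : Nat) : List (List Char) :=
  if hg : s.length < searchStart then
    [PySem.List.slice s (some (searchStart : Int)) none]
  else
    let pos := PySem.Chars.findFrom s qqq (searchStart : Int) none
    if hpos : pos = -1 then
      [PySem.List.slice s (some (searchStart : Int)) none]
    else
      let quoteStart := pos.toNat
      let pos2 := aInner s quoteStart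
      PySem.List.slice s (some (searchStart : Int)) (some pos)
        :: (List.replicate (pos2 - quoteStart) ['\\', '"']).flatten   -- '\\"' * (pos - quote_start)
        :: aOuter s pos2
termination_by s.length - searchStart
decreasing_by
  have hk : searchStart ≤ s.length := le_of_not_gt hg
  obtain ⟨h1, h2, _⟩ := PySem.Chars.findFrom_natCast_spec s qqq searchStart hk hpos
  have hnn : (0:Int) ≤ PySem.Chars.findFrom s qqq (searchStart : Int) :=
    le_trans (Int.natCast_nonneg _) h1
  have h3 := prefix_countRun_ge _ h2
  have hlen : (PySem.Chars.findFrom s qqq (searchStart : Int)).toNat + 3 ≤ s.length := by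
    have := h2.length_le
    rw [List.length_drop, show qqq.length = 3 from rfl] at this
    omega
  rw [aInner_eq]
  omega

-- ''.join(res): concatenation of the pieces (exact for separator '')
def escape_multi_quote (s : String) : String :=
  String.ofList (aOuter s.toList 0).flatten

-- ===== PORT B =====
-- Source B's outer while loop: consume one maximal run of identical characters per step
def bGo (t : List Char) : List Char :=
  match t with
  | [] => []
  | c :: rest =>
    let run := countRun c rest + 1
    let piece := if c = '"' ∧ 3 ≤ run then (List.replicate run ['\\', '"']).flatten
                 else List.replicate run c
    piece ++ bGo (rest.drop (run - 1))
termination_by t.length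
decreasing_by
  simp only [List.length_drop, List.length_cons]
  omega

def escape_multi_quote_alt (s : String) : String :=
  String.ofList (bGo s.toList)

-- ===== PRECONDITION & SPEC =====
def Spec_escape_multi_quote (s : String) (out : String) : Prop := out = escape_multi_quote_alt s
instance (s : String) (out : String) : Decidable (Spec_escape_multi_quote s out) := by unfold Spec_escape_multi_quote; infer_instance

-- ===== CLAIM (what is proved, stated in full; the proofs are below) =====
def Claim_equal_escape_multi_quote : Prop := ∀ (s : String), Dom_escape_multi_quote s → Spec_escape_multi_quote s (escape_multi_quote s)

-- ===== LEMMAS AND PROOFS =====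

lemma countRun_le (c : Char) (xs : List Char) : countRun c xs ≤ xs.length := by
  induction xs with
  | nil => simp [countRun]
  | cons x xs ih =>
      by_cases h : x = c
      · simp [countRun, h]; omega
      · simp [countRun, h]

lemma take_countRun (c : Char) (xs : List Char) :
    xs.take (countRun c xs) = List.replicate (countRun c xs) c := by
  induction xs with
  | nil => simp [countRun]
  | cons x xs ih =>
      by_cases h : x = c
      · simp [countRun, h, List.replicate_succ, ih]
      · simp [countRun, h]

lemma getElem?_countRun (c : Char) (xs : List Char) : xs[countRun c xs]? ≠ some c := by
  induction xs with
  | nil => simp [countRun]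
  | cons x xs ih =>
      by_cases h : x = c
      · simpa [countRun, h] using ih
      · simp [countRun, h]

lemma prefix3_iff (t : List Char) :
    qqq <+: t ↔ t[0]? = some '"' ∧ t[1]? = some '"' ∧ t[2]? = some '"' := by
  rw [show qqq = '"' :: '"' :: '"' :: ([] : List Char) from rfl]
  match t with
  | [] => simp
  | [a] => simp [List.cons_prefix_cons]
  | [a, b] => simp [List.cons_prefix_cons, eq_comm]
  | a :: b :: c :: t' => simp [List.cons_prefix_cons, eq_comm]

-- no occurrence of '"""' starts inside a maximal run that B leaves verbatim
lemma noOcc_in_run (s : List Char) (k : Nat) (c : Char) (rest : List Char)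
    (hdrop : s.drop k = c :: rest)
    (hnot : ¬ (c = '"' ∧ 3 ≤ countRun c rest + 1)) :
    ∀ i, k ≤ i → i < k + (countRun c rest + 1) → ¬ qqq <+: s.drop i := by
  intro i hki hilt hpre
  set r := countRun c rest with hr
  have hidx : ∀ j : Nat, j ≤ r → s[k + j]? = some c := by
    intro j hj
    rw [← List.getElem?_drop, hdrop]
    cases j with
    | zero => simp
    | succ j' =>
      simp only [List.getElem?_cons_succ]
      have hcr := congrArg (fun l => l[j']?) (take_countRun c rest)
      simp only [List.getElem?_take, ← hr] at hcr
      rw [if_pos (by omega)] at hcr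
      rw [hcr, List.getElem?_replicate, if_pos (by omega)]
  have hafter : s[k + (r + 1)]? ≠ some c := by
    rw [← List.getElem?_drop, hdrop]
    simp only [List.getElem?_cons_succ]
    rw [hr]
    exact getElem?_countRun c rest
  rw [prefix3_iff] at hpre
  obtain ⟨h0, h1, h2⟩ := hpre
  rw [List.getElem?_drop] at h0 h1 h2
  by_cases hc : c = '"'
  · -- a run of at most two quotes: one of i+1, i+2 is the first non-quote position k+r+1
    have hr2 : r + 1 ≤ 2 := by
      by_contra h
      exact hnot ⟨hc, by omega⟩
    rcases (show i + 1 = k + (r + 1) ∨ i + 2 = k + (r + 1) by omega) with h | h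
    · rw [h] at h1; exact hafter (by rw [h1, hc])
    · rw [h] at h2; exact hafter (by rw [h2, hc])
  · -- a run of a non-quote character: s[i] = c ≠ '"'
    have hci := hidx (i - k) (by omega)
    rw [show k + (i - k) = i + 0 by omega] at hci
    rw [h0] at hci
    exact hc (Option.some.inj hci).symm

-- if '"""' is a prefix of s.drop k then find from k returns k itself
lemma findFrom_self (s : List Char) (k : Nat) (hk : k ≤ s.length)
    (h : qqq <+: s.drop k) : PySem.Chars.findFrom s qqq (k : Int) = (k : Int) := by
  have hne : PySem.Chars.findFrom s qqq (k : Int) ≠ -1 := by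
    rw [ne_eq, PySem.Chars.findFrom_natCast_eq_neg_one_iff s qqq k hk, not_not]
    exact h.isInfix
  obtain ⟨h1, h2, h3⟩ := PySem.Chars.findFrom_natCast_spec s qqq k hk hne
  have hnn : (0:Int) ≤ PySem.Chars.findFrom s qqq (k : Int) := le_trans (Int.natCast_nonneg _) h1
  have : (PySem.Chars.findFrom s qqq (k : Int)).toNat = k := by
    by_contra hne2
    exact h3 k le_rfl (by omega) h
  omega

-- A emits any block [k, m) containing no occurrence of '"""' verbatim
lemma stepA (s : List Char) (k m : Nat) (hkm : k ≤ m) (hm : m ≤ s.length)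
    (hno : ∀ i, k ≤ i → i < m → ¬ qqq <+: s.drop i) :
    (aOuter s k).flatten = (s.drop k).take (m - k) ++ (aOuter s m).flatten := by
  have hdd : s.drop m = (s.drop k).drop (m - k) := by
    rw [List.drop_drop]; congr 1; omega
  rw [aOuter.eq_def, aOuter.eq_def]
  have hgk : ¬ s.length < k := by omega
  have hgm : ¬ s.length < m := by omega
  rw [dif_neg hgk, dif_neg hgm]
  by_cases hk1 : PySem.Chars.findFrom s qqq (k : Int) = -1
  · have hnok : ¬ qqq <:+: s.drop k :=
      (PySem.Chars.findFrom_natCast_eq_neg_one_iff s qqq k (by omega)).mp hk1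
    have hm1 : PySem.Chars.findFrom s qqq (m : Int) = -1 := by
      rw [PySem.Chars.findFrom_natCast_eq_neg_one_iff s qqq m hm]
      intro hin
      apply hnok
      have hsfx : s.drop m <:+: s.drop k := by
        rw [hdd]; exact (List.drop_suffix _ _).isInfix
      exact hin.trans hsfx
    simp only [hk1, hm1, dite_eq_ite, ite_true, List.flatten_cons, List.flatten_nil,
      List.append_nil, PySem.List.slice_from_natCast]
    rw [hdd, List.take_append_drop]
  · obtain ⟨h1, h2, h3⟩ := PySem.Chars.findFrom_natCast_spec s qqq k (by omega) hk1
    have hnn : (0:Int) ≤ PySem.Chars.findFrom s qqq (k : Int) :=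
      le_trans (Int.natCast_nonneg _) h1
    set fk := PySem.Chars.findFrom s qqq (k : Int) with hfk
    set n := fk.toNat with hn
    have hmn : m ≤ n := by
      by_contra hlt
      exact hno n (by omega) (by omega) h2
    have hm1 : PySem.Chars.findFrom s qqq (m : Int) = fk := by
      have hne : PySem.Chars.findFrom s qqq (m : Int) ≠ -1 := by
        rw [ne_eq, PySem.Chars.findFrom_natCast_eq_neg_one_iff s qqq m hm, not_not]
        have hdn : s.drop n = (s.drop m).drop (n - m) := by
          rw [List.drop_drop]; congr 1; omega
        exact (hdn ▸ h2).isInfix.trans (List.drop_suffix (n - m) (s.drop m)).isInfix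
      obtain ⟨g1, g2, g3⟩ := PySem.Chars.findFrom_natCast_spec s qqq m hm hne
      have gnn : (0:Int) ≤ PySem.Chars.findFrom s qqq (m : Int) :=
        le_trans (Int.natCast_nonneg _) g1
      have htn : (PySem.Chars.findFrom s qqq (m : Int)).toNat = n := by
        rcases Nat.lt_trichotomy (PySem.Chars.findFrom s qqq (m : Int)).toNat n with h | h | h
        · exact absurd g2 (h3 _ (by omega) h)
        · exact h
        · exact absurd h2 (g3 n (by omega) h)
      omega
    rw [dif_neg hk1, hm1, dif_neg hk1]
    simp only [List.flatten_cons]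
    have hfkn : fk = ((n : Nat) : Int) := by omega
    rw [hfkn, PySem.List.slice_natCast, PySem.List.slice_natCast,
        show n - k = (m - k) + (n - m) by omega, List.take_add, hdd]
    simp [List.append_assoc]

-- the main invariant: from any position k, A's remaining output is B of the remaining input
lemma bGo_cons (c : Char) (rest : List Char) :
    bGo (c :: rest) = (if c = '"' ∧ 3 ≤ countRun c rest + 1
        then (List.replicate (countRun c rest + 1) ['\\', '"']).flatten
        else List.replicate (countRun c rest + 1) c)
      ++ bGo (rest.drop (countRun c rest)) := by
  rw [bGo]
  simp

lemma main_eq (s : List Char) (k : Nat) (hk : k ≤ s.length) :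
    (aOuter s k).flatten = bGo (s.drop k) := by
  cases hdrop : s.drop k with
  | nil =>
    rw [aOuter.eq_def]
    have hg : ¬ s.length < k := by omega
    have hf : PySem.Chars.findFrom s qqq (k : Int) = -1 := by
      rw [PySem.Chars.findFrom_natCast_eq_neg_one_iff s qqq k hk, hdrop]
      intro h
      have := h.length_le
      simp [qqq] at this
    rw [dif_neg hg]
    conv_rhs => rw [bGo]
    simp [hf, hdrop, PySem.List.slice_from_natCast]
  | cons c rest =>
    have hlendrop : (s.drop k).length = s.length - k := List.length_drop
    rw [hdrop, List.length_cons] at hlendrop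
    have hcle := countRun_le c rest
    have hklt : k < s.length := by omega
    have hdropnext : s.drop (k + (countRun c rest + 1)) = rest.drop (countRun c rest) := by
      rw [show k + (countRun c rest + 1) = (k + 1) + countRun c rest by omega,
          ← List.drop_drop, ← List.drop_drop, hdrop]
      simp
    have ih : (aOuter s (k + (countRun c rest + 1))).flatten
        = bGo (s.drop (k + (countRun c rest + 1))) :=
      main_eq s _ (by omega)
    by_cases hesc : c = '"' ∧ 3 ≤ countRun c rest + 1
    · obtain ⟨hc, h3⟩ := hesc
      have hpre : qqq <+: s.drop k := by
        rw [prefix3_iff]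
        refine ⟨?_, ?_, ?_⟩ <;> rw [hdrop]
        · simp [hc]
        · simp only [List.getElem?_cons_succ]
          have hcr := congrArg (fun l => l[0]?) (take_countRun c rest)
          simp only [List.getElem?_take] at hcr
          rw [if_pos (by omega)] at hcr
          rw [hcr, List.getElem?_replicate, if_pos (by omega), hc]
        · simp only [List.getElem?_cons_succ]
          have hcr := congrArg (fun l => l[1]?) (take_countRun c rest)
          simp only [List.getElem?_take] at hcr
          rw [if_pos (by omega)] at hcr
          rw [hcr, List.getElem?_replicate, if_pos (by omega), hc]
      have hff := findFrom_self s k hk hpre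
      rw [aOuter.eq_def]
      have hg : ¬ s.length < k := by omega
      have hne : ¬ PySem.Chars.findFrom s qqq (k : Int) = -1 := by
        rw [hff]; omega
      rw [dif_neg hg, dif_neg hne]
      simp only [List.flatten_cons]
      rw [hff]
      simp only [Int.toNat_natCast]
      have hinner : aInner s k = k + (countRun c rest + 1) := by
        rw [aInner_eq, hdrop, hc]
        simp [countRun]
      rw [hinner, ih]
      have hslice : PySem.List.slice s (some ((k : Nat) : Int)) (some ((k : Nat) : Int)) = [] := by
        rw [PySem.List.slice_natCast]; simp
      rw [hslice]
      conv_rhs => rw [bGo_cons]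
      rw [if_pos ⟨hc, h3⟩, hdropnext]
      simp only [List.nil_append]
      rw [show k + (countRun c rest + 1) - k = countRun c rest + 1 by omega]
    · have hno := noOcc_in_run s k c rest hdrop hesc
      rw [stepA s k (k + (countRun c rest + 1)) (by omega) (by omega) hno, ih]
      conv_rhs => rw [bGo_cons]
      rw [if_neg hesc, hdropnext]
      congr 1
      rw [show k + (countRun c rest + 1) - k = countRun c rest + 1 by omega, hdrop,
          List.take_succ_cons, take_countRun]
      simp [List.replicate_succ]
termination_by s.length - k
decreasing_by omega

-- ===== VERDICT (by name: the statement is the Claim_ definition above) =====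
theorem escape_multi_quote_spec : Claim_equal_escape_multi_quote := by
  intro s _
  unfold Spec_escape_multi_quote escape_multi_quote escape_multi_quote_alt
  rw [main_eq s.toList 0 (by omega)]
  simp
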